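-- pv_equiv track=rewrite | github.com/VivienneForReal/FuzzSIM | src/set.py | enumerate_tup
-- ===== SOURCE A (Python) =====
-- def enumerate_tup(tup, seen=None):
--     """
--     Recursively enumerate all possible sub-tuples (by removing elements) from a given tuple.
--
--     :param tup: Input tuple
--     :param seen: Set to store unique sub-tuples
--     :return: Set of tuples
--     """
--     if seen is None:
--         seen = set()
--
--     # Add the current tuple to the set
--     seen.add(tup)
--
--     if len(tup) <= 1:
--         return seen
--
--     for i in range(len(tup)):
--         # Create a new tuple by removing the i-th element
--         sub_tup = tup[:i] + tup[i+1:]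
--
--         if sub_tup not in seen:
--             enumerate_tup(sub_tup, seen)
--
--     return seen
-- ===== SOURCE B (Python) =====
-- def enumerate_tup(tup, seen=None):
--     """Iterative worklist version: explicit LIFO stack instead of recursion."""
--     if seen is None:
--         seen = set()
--     seen.add(tup)
--     if len(tup) <= 1:
--         return seen
--     stack = [tup[:i] + tup[i + 1:] for i in reversed(range(len(tup)))]
--     while stack:
--         t = stack.pop()
--         if t in seen:
--             continue
--         seen.add(t)
--         if len(t) > 1:
--             stack.extend(t[:i] + t[i + 1:] for i in reversed(range(len(t))))
--     return seen
-- ===== Notes on version B (the rewrite author's own statement) =====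
-- stated objective: alternative
-- what changed: Replaces A's recursion (DFS with seen-based pruning) by an iterative explicit-stack worklist: pop a tuple, skip it if already seen, otherwise record it and push its one-element-deletion children.
import Mathlib
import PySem

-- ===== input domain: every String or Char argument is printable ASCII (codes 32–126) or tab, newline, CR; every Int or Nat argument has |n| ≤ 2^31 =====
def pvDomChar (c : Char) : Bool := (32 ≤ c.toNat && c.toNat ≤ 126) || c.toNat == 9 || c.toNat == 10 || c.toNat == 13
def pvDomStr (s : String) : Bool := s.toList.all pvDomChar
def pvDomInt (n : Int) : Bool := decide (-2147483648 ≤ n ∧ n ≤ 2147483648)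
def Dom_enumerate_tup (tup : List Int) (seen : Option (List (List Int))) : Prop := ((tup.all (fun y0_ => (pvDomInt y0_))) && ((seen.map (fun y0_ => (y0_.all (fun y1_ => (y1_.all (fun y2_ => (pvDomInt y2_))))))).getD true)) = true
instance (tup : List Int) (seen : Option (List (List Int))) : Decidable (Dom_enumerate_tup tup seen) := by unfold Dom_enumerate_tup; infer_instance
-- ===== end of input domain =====

-- B replaces A's recursion by an explicit LIFO worklist loop (same cost); in Python both
-- A and B mutate the caller's `seen` set — the equivalence proved here is about the
-- return value (which is that same set).

-- ===== PORT A =====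
-- A's recursion; fuel = tup.length + 1 is a totality guard only (the invariant
-- fuel = len + 1 holds along every recursive call, so the 0 branch is never reached).
def enumerate_tup_go : Nat → List Int → PySem.Set (List Int) → PySem.Set (List Int)
  | 0, _, seen => seen
  | (f+1), tup, seen =>
    let seen1 := PySem.Set.add seen tup            -- seen.add(tup)
    if tup.length ≤ 1 then seen1
    else
      -- for i in range(len(tup)): sub = tup[:i] + tup[i+1:]; if sub not in seen: recurse
      (List.range tup.length).foldl
        (fun s (i : Nat) =>
          let sub := PySem.List.slice tup none (some (i : Int)) ++
                     PySem.List.slice tup (some ((i : Int) + 1)) none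
          if PySem.Set.contains s sub then s else enumerate_tup_go f sub s)
        seen1

def enumerate_tup (tup : List Int) (seen : Option (List (List Int))) : List (List Int) :=
  enumerate_tup_go (tup.length + 1) tup (PySem.Set.ofList (seen.getD []))

-- ===== PORT B =====
-- sub-tuples by one deletion, in index order; Python pushes them reversed onto an
-- end-popping stack, so head-as-top with this order is the same LIFO discipline
def enumerate_tup_children (t : List Int) : List (List Int) :=
  (List.range t.length).map
    (fun (i : Nat) => PySem.List.slice t none (some (i : Int)) ++
              PySem.List.slice t (some ((i : Int) + 1)) none)

-- length of a one-deletion sub-tuple (used by the worklist's termination measure)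
theorem enumerate_tup_sub_length (t : List Int) (i : Nat) (h : i < t.length) :
    (PySem.List.slice t none (some (i : Int)) ++
     PySem.List.slice t (some ((i : Int) + 1)) none).length = t.length - 1 := by
  have h1 : ((i : Int) + 1) = ((i + 1 : Nat) : Int) := by push_cast; ring
  rw [h1, PySem.List.slice_to_natCast, PySem.List.slice_from_natCast]
  simp; omega

theorem enumerate_tup_children_measure (t : List Int) (h : 1 < t.length) :
    ((enumerate_tup_children t).map (fun u => (u.length + 1).factorial)).sum
      < (t.length + 1).factorial := by
  unfold enumerate_tup_children
  rw [List.map_map]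
  rw [List.sum_eq_card_nsmul _ (t.length).factorial ?_]
  · simp only [List.length_map, List.length_range, smul_eq_mul, Nat.factorial_succ]
    exact Nat.mul_lt_mul_of_lt_of_le (by omega) le_rfl (Nat.factorial_pos _)
  · intro x hx
    rcases List.mem_map.mp hx with ⟨i, hi, rfl⟩
    have hi' : i < t.length := List.mem_range.mp hi
    simp only [Function.comp]
    rw [enumerate_tup_sub_length t i hi']
    congr 1
    omega

def enumerate_tup_loop (stack : List (List Int)) (seen : PySem.Set (List Int)) :
    PySem.Set (List Int) :=
  match stack with
  | [] => seen
  | t :: rest =>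
    if PySem.Set.contains seen t then enumerate_tup_loop rest seen
    else
      let seen' := PySem.Set.add seen t
      if t.length ≤ 1 then enumerate_tup_loop rest seen'
      else enumerate_tup_loop (enumerate_tup_children t ++ rest) seen'
termination_by (stack.map (fun u => (u.length + 1).factorial)).sum
decreasing_by
  · simp only [List.map_cons, List.sum_cons]
    have := Nat.factorial_pos (t.length + 1); omega
  · simp only [List.map_cons, List.sum_cons]
    have := Nat.factorial_pos (t.length + 1); omega
  · simp only [List.map_cons, List.sum_cons, List.map_append, List.sum_append]
    have := enumerate_tup_children_measure t (by omega); omega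

def enumerate_tup_alt (tup : List Int) (seen : Option (List (List Int))) : List (List Int) :=
  let s := PySem.Set.ofList (seen.getD [])
  let s1 := PySem.Set.add s tup
  if tup.length ≤ 1 then s1
  else enumerate_tup_loop (enumerate_tup_children tup) s1

-- ===== PRECONDITION & SPEC =====
def Spec_enumerate_tup (tup : List Int) (seen : Option (List (List Int))) (out : List (List Int)) : Prop := out = enumerate_tup_alt tup seen
instance (tup : List Int) (seen : Option (List (List Int))) (out : List (List Int)) : Decidable (Spec_enumerate_tup tup seen out) := by unfold Spec_enumerate_tup; infer_instance

-- ===== CLAIM (what is proved, stated in full; the proofs are below) =====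
def Claim_equal_enumerate_tup : Prop := ∀ (tup : List Int) (seen : Option (List (List Int))), Dom_enumerate_tup tup seen → Spec_enumerate_tup tup seen (enumerate_tup tup seen)

-- ===== LEMMAS AND PROOFS =====

-- Simulation: popping an unseen t and running the worklist equals finishing A's whole
-- recursive call on t first, then continuing with the rest of the stack (mutual with
-- the per-index form below, by the same (length, indices-left) measure).
mutual
theorem enumerate_tup_sim (t : List Int) (seen : PySem.Set (List Int))
    (rest : List (List Int)) (h : PySem.Set.contains seen t = false) :
    enumerate_tup_loop (t :: rest) seen
      = enumerate_tup_loop rest (enumerate_tup_go (t.length + 1) t seen) := by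
  rw [enumerate_tup_loop, h]
  simp only [Bool.false_eq_true, if_false]
  by_cases hl : t.length ≤ 1
  · rw [if_pos hl]
    simp [enumerate_tup_go, hl]
  · rw [if_neg hl]
    rw [show enumerate_tup_children t = (List.range' 0 t.length).map
        (fun (i : Nat) => PySem.List.slice t none (some (i : Int)) ++
                  PySem.List.slice t (some ((i : Int) + 1)) none) by
      simp [enumerate_tup_children, List.range_eq_range']]
    rw [enumerate_tup_sim_loop t (PySem.Set.add seen t) rest 0 t.length (by omega)]
    simp [enumerate_tup_go, hl, List.range_eq_range']
termination_by (t.length, t.length + 1)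

theorem enumerate_tup_sim_loop (t : List Int) (seen : PySem.Set (List Int))
    (rest : List (List Int)) (i n : Nat) (hn : i + n = t.length) :
    enumerate_tup_loop ((List.range' i n).map
        (fun (j : Nat) => PySem.List.slice t none (some (j : Int)) ++
                  PySem.List.slice t (some ((j : Int) + 1)) none) ++ rest) seen
      = enumerate_tup_loop rest ((List.range' i n).foldl
          (fun s (j : Nat) =>
            let sub := PySem.List.slice t none (some (j : Int)) ++
                       PySem.List.slice t (some ((j : Int) + 1)) none
            if PySem.Set.contains s sub then s else enumerate_tup_go t.length sub s)
          seen) := by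
  match n with
  | 0 => simp
  | (m+1) =>
    rw [List.range'_succ]
    set sub := PySem.List.slice t none (some (i : Int)) ++
               PySem.List.slice t (some ((i : Int) + 1)) none with hsub
    have hi : i < t.length := by omega
    have hlen : sub.length = t.length - 1 := enumerate_tup_sub_length t i hi
    simp only [List.map_cons, List.cons_append, List.foldl_cons]
    by_cases hc : PySem.Set.contains seen sub
    · rw [enumerate_tup_loop, if_pos hc, if_pos hc]
      exact enumerate_tup_sim_loop t seen rest (i+1) m (by omega)
    · have hc' : PySem.Set.contains seen sub = false := by simpa using hc
      rw [if_neg hc]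
      rw [enumerate_tup_sim sub seen _ hc']
      have hfuel : sub.length + 1 = t.length := by omega
      rw [hfuel]
      exact enumerate_tup_sim_loop t _ rest (i+1) m (by omega)
termination_by (t.length, n)
decreasing_by
  · exact Prod.Lex.right _ (by omega)
  · exact Prod.Lex.left _ _ (by have := enumerate_tup_sub_length t i hi; omega)
  · exact Prod.Lex.right _ (by omega)
end

-- ===== VERDICT (by name: the statement is the Claim_ definition above) =====
theorem enumerate_tup_spec : Claim_equal_enumerate_tup := by
  intro tup seen _
  unfold Spec_enumerate_tup enumerate_tup enumerate_tup_alt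
  by_cases hl : tup.length ≤ 1
  · simp [enumerate_tup_go, hl]
  · simp only [hl, if_false]
    rw [show enumerate_tup_children tup = (List.range' 0 tup.length).map
        (fun (i : Nat) => PySem.List.slice tup none (some (i : Int)) ++
                  PySem.List.slice tup (some ((i : Int) + 1)) none) by
      simp [enumerate_tup_children, List.range_eq_range']]
    have h2 := enumerate_tup_sim_loop tup
      (PySem.Set.add (PySem.Set.ofList (seen.getD [])) tup) [] 0 tup.length (by omega)
    simp only [List.append_nil] at h2
    rw [h2]
    simp [enumerate_tup_go, enumerate_tup_loop, hl, List.range_eq_range']
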